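-- pv_equiv track=rewrite | github.com/BertRules/Global_reconstruction_of_language_models_with_linguistic_rules | rule/aspectrulemine.py | __get_term_pos_type_sent
-- ===== SOURCE A (Python) =====
-- def __get_term_pos_type_sent(term_pos_tags):
--     for t in term_pos_tags:
--         if t  == 'SENT_S':
--             return 'SENT_S'
--     for t in term_pos_tags:
--         if t == 'SENT_O':
--             return 'SENT_O'
--     return None
-- ===== SOURCE B (Python) =====
-- def __get_term_pos_type_sent(term_pos_tags):
--     saw_o = False
--     for t in term_pos_tags:
--         if t == 'SENT_S':
--             return 'SENT_S'
--         if t == 'SENT_O':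
--             saw_o = True
--     return 'SENT_O' if saw_o else None
-- ===== Notes on version B (the rewrite author's own statement) =====
-- stated objective: simpler
-- what changed: Fuses A's two sequential scans into one pass that returns SENT_S immediately and remembers a saw_o flag, returning SENT_O after the loop only if the flag was set.
import Mathlib
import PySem

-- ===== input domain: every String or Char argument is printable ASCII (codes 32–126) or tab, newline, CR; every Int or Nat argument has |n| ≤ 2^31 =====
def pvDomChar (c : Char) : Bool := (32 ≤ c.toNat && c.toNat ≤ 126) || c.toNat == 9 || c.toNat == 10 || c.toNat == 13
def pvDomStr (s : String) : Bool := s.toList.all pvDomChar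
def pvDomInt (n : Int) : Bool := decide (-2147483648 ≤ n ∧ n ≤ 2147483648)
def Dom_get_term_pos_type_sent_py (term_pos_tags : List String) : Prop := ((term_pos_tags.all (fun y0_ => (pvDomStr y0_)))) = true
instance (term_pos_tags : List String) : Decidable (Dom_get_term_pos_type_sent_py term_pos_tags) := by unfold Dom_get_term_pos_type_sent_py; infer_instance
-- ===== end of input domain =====

-- B fuses A's two sequential scans into one pass with a saw_o flag (objective: simpler).

-- ===== PORT A =====
-- first loop: return 'SENT_S' on a match, else fall through
def pvLoopS : List String → Option String
  | [] => none
  | t :: rest => if t = "SENT_S" then some "SENT_S" else pvLoopS rest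

-- second loop: return 'SENT_O' on a match, else fall through
def pvLoopO : List String → Option String
  | [] => none
  | t :: rest => if t = "SENT_O" then some "SENT_O" else pvLoopO rest

def get_term_pos_type_sent_py (term_pos_tags : List String) : Option String :=
  match pvLoopS term_pos_tags with
  | some r => some r
  | none =>
    match pvLoopO term_pos_tags with
    | some r => some r
    | none => none

-- ===== PORT B =====
-- single pass carrying the saw_o flag
def pvAltGo : List String → Bool → Option String
  | [], sawO => if sawO then some "SENT_O" else none
  | t :: rest, sawO =>
    if t = "SENT_S" then some "SENT_S"
    else pvAltGo rest (sawO || t = "SENT_O")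

def get_term_pos_type_sent_py_alt (term_pos_tags : List String) : Option String :=
  pvAltGo term_pos_tags false

-- ===== PRECONDITION & SPEC =====
def Spec_get_term_pos_type_sent_py (term_pos_tags : List String) (out : Option String) : Prop := out = get_term_pos_type_sent_py_alt term_pos_tags
instance (term_pos_tags : List String) (out : Option String) : Decidable (Spec_get_term_pos_type_sent_py term_pos_tags out) := by unfold Spec_get_term_pos_type_sent_py; infer_instance

-- ===== CLAIM (what is proved, stated in full; the proofs are below) =====
def Claim_equal_get_term_pos_type_sent_py : Prop := ∀ (term_pos_tags : List String), Dom_get_term_pos_type_sent_py term_pos_tags → Spec_get_term_pos_type_sent_py term_pos_tags (get_term_pos_type_sent_py term_pos_tags)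

-- ===== LEMMAS AND PROOFS =====
theorem pvLoopS_eq (ts : List String) :
    pvLoopS ts = (if "SENT_S" ∈ ts then some "SENT_S" else none) := by
  induction ts with
  | nil => simp [pvLoopS]
  | cons t rest ih =>
    by_cases h : t = "SENT_S"
    · subst h; simp [pvLoopS]
    · simp [pvLoopS, h, ih, Ne.symm h]

theorem pvLoopO_eq (ts : List String) :
    pvLoopO ts = (if "SENT_O" ∈ ts then some "SENT_O" else none) := by
  induction ts with
  | nil => simp [pvLoopO]
  | cons t rest ih =>
    by_cases h : t = "SENT_O"
    · subst h; simp [pvLoopO]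
    · simp [pvLoopO, h, ih, Ne.symm h]

theorem pvAltGo_eq (ts : List String) (sawO : Bool) :
    pvAltGo ts sawO =
      (if "SENT_S" ∈ ts then some "SENT_S"
       else if sawO || "SENT_O" ∈ ts then some "SENT_O" else none) := by
  induction ts generalizing sawO with
  | nil => cases sawO <;> simp [pvAltGo]
  | cons t rest ih =>
    by_cases hs : t = "SENT_S"
    · subst hs; simp [pvAltGo]
    · by_cases ho : t = "SENT_O"
      · subst ho; cases sawO <;> simp [pvAltGo, hs, ih, Ne.symm hs]
      · simp [pvAltGo, hs, ho, ih, Ne.symm hs, Ne.symm ho]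

-- ===== VERDICT (by name: the statement is the Claim_ definition above) =====
theorem get_term_pos_type_sent_py_spec : Claim_equal_get_term_pos_type_sent_py := by
  intro ts _
  unfold Spec_get_term_pos_type_sent_py get_term_pos_type_sent_py get_term_pos_type_sent_py_alt
  rw [pvLoopS_eq, pvLoopO_eq, pvAltGo_eq]
  by_cases hs : "SENT_S" ∈ ts <;> by_cases ho : "SENT_O" ∈ ts <;> simp [hs, ho]
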